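-- pv_equiv track=rewrite | github.com/sanjithav/Traversals | traversals.py | secondary_diagonal_traversal
-- ===== SOURCE A (Python) =====
-- def secondary_diagonal_traversal(grid):
--     """Iterates over a 2D list from the top-left to the bottom-right in
--     the direction of the secondary diagonal and returning the coordinates (row, column)."""
--     result = []
--     rows = len(grid)
--     cols = len(grid[0])
--
--     for c in range(cols):
--         r = 0
--         while r<rows and c>=0 :
--             result.append((r, c))
--             r += 1
--             c -= 1
--     for r in range(1,rows):
--         c = cols-1
--         while r<rows and c>=0 :
--             result.append((r, c))
--             r += 1
--             c -= 1
--     return result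
-- ===== SOURCE B (Python) =====
-- def secondary_diagonal_traversal(grid):
--     """Iterates over a 2D list from the top-left to the bottom-right in
--     the direction of the secondary diagonal and returning the coordinates (row, column)."""
--     rows = len(grid)
--     cols = len(grid[0])
--     result = []
--     for s in range(rows + cols - 1):
--         for r in range(max(0, s - cols + 1), min(rows, s + 1)):
--             result.append((r, s - r))
--     return result
-- ===== Notes on version B (the rewrite author's own statement) =====
-- stated objective: simpler
-- what changed: Replaces A's two seed phases (a loop launching a down-left while-walk from each top-row cell, then another from each right-column cell) with one loop over the diagonal sum s whose row bounds are computed arithmetically.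
import Mathlib
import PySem

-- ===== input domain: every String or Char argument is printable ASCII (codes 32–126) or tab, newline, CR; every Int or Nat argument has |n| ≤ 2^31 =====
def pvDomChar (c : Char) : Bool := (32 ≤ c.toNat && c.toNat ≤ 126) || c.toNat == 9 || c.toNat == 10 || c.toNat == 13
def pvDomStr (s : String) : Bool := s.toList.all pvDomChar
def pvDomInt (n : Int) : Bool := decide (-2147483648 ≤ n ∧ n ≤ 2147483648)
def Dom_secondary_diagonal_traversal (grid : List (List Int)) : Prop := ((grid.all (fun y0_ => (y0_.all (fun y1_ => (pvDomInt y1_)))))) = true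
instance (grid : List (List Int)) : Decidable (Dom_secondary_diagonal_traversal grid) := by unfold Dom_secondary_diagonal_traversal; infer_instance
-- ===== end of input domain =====

-- B replaces A's two seed loops (top row, then right column) with a single loop over the
-- diagonal sum s with arithmetically derived row bounds; objective: simpler.

-- ===== PORT A =====
-- the inner 'while r<rows and c>=0: append((r,c)); r+=1; c-=1' of A, as the list of appended pairs
def pvWhileA (rows r : Nat) (c : Int) : List (Int × Int) :=
  if h : r < rows ∧ 0 ≤ c then ((r : Int), c) :: pvWhileA rows (r + 1) (c - 1) else []
termination_by rows - r
decreasing_by omega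

def secondary_diagonal_traversal (grid : List (List Int)) : List (Int × Int) :=
  let rows := grid.length
  let cols := (grid.headD []).length   -- len(grid[0]); Pre_ excludes grid = [] where Python raises IndexError
  let res1 := (List.range cols).foldl (fun res (c : Nat) => res ++ pvWhileA rows 0 (c : Int)) []
  (List.range' 1 (rows - 1)).foldl (fun res (r : Nat) => res ++ pvWhileA rows r ((cols : Int) - 1)) res1

-- ===== PORT B =====
def secondary_diagonal_traversal_alt (grid : List (List Int)) : List (Int × Int) :=
  let rows := grid.length
  let cols := (grid.headD []).length   -- len(grid[0]); Pre_ excludes grid = [] where Python raises IndexError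
  (List.range (rows + cols - 1)).foldl (fun res (s : Nat) =>
    -- for r in range(max(0, s-cols+1), min(rows, s+1)): result.append((r, s-r))
    (List.range' (s + 1 - cols) (min rows (s + 1) - (s + 1 - cols))).foldl
      (fun res2 (r : Nat) => res2 ++ [((r : Int), (s : Int) - (r : Int))]) res) []

-- ===== PRECONDITION & SPEC =====
-- Pre_ excludes only the empty grid, where Python A (and B alike) raise IndexError on grid[0].
def Pre_secondary_diagonal_traversal (grid : List (List Int)) : Prop := grid ≠ []
instance (grid : List (List Int)) : Decidable (Pre_secondary_diagonal_traversal grid) := by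
  unfold Pre_secondary_diagonal_traversal; infer_instance
def pvWitness_secondary_diagonal_traversal : List (List Int) := [[1, 2], [3, 4], [5, 6]]

def Spec_secondary_diagonal_traversal (grid : List (List Int)) (out : List (Int × Int)) : Prop :=
  out = secondary_diagonal_traversal_alt grid
instance (grid : List (List Int)) (out : List (Int × Int)) : Decidable (Spec_secondary_diagonal_traversal grid out) := by
  unfold Spec_secondary_diagonal_traversal; infer_instance

-- ===== CLAIM (what is proved, stated in full; the proofs are below) =====
def Claim_equal_secondary_diagonal_traversal : Prop := ∀ (grid : List (List Int)), Dom_secondary_diagonal_traversal grid → Pre_secondary_diagonal_traversal grid → Spec_secondary_diagonal_traversal grid (secondary_diagonal_traversal grid)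

-- ===== LEMMAS AND PROOFS =====

lemma pvWhileA_eq (n rows r : Nat) (c : Int) (h : rows - r ≤ n) :
    pvWhileA rows r c =
      (List.range' r (min (rows - r) (c + 1).toNat)).map
        (fun (k : Nat) => ((k : Int), c + (r : Int) - (k : Int))) := by
  induction n generalizing r c with
  | zero =>
    rw [pvWhileA, dif_neg (by omega : ¬ (r < rows ∧ 0 ≤ c))]
    have hm : min (rows - r) (c + 1).toNat = 0 := by omega
    rw [hm]; rfl
  | succ n ih =>
    rw [pvWhileA]
    by_cases hc : r < rows ∧ 0 ≤ c
    · rw [dif_pos hc, ih (r + 1) (c - 1) (by omega)]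
      have hm : min (rows - r) (c + 1).toNat = (min (rows - (r + 1)) ((c - 1) + 1).toNat) + 1 := by
        omega
      rw [hm, List.range'_succ, List.map_cons]
      congr 1
      · simp
      · apply List.map_congr_left
        intro k _
        simp only [Prod.mk.injEq, true_and]
        push_cast
        ring
    · rw [dif_neg hc]
      have hm : min (rows - r) (c + 1).toNat = 0 := by omega
      rw [hm]; rfl

lemma flatMap_congr' {α β : Type} (l : List α) (f g : α → List β)
    (h : ∀ x ∈ l, f x = g x) : l.flatMap f = l.flatMap g := by
  induction l with
  | nil => rfl
  | cons a l ih =>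
    simp only [List.flatMap_cons]
    rw [h a (by simp), ih (fun x hx => h x (by simp [hx]))]

-- the diagonal with sum s, as B produces it
def pvDiag (rows cols s : Nat) : List (Int × Int) :=
  (List.range' (s + 1 - cols) (min rows (s + 1) - (s + 1 - cols))).map
    (fun (r : Nat) => ((r : Int), (s : Int) - (r : Int)))

lemma diag_first (rows cols s : Nat) (hs : s < cols) :
    pvDiag rows cols s = pvWhileA rows 0 (s : Int) := by
  rw [pvWhileA_eq rows rows 0 (s : Int) (by omega)]
  unfold pvDiag
  have h2 : min rows (s + 1) - (s + 1 - cols) = min (rows - 0) (((s : Int)) + 1).toNat := by omega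
  have h1 : s + 1 - cols = 0 := by omega
  rw [h2, h1]
  apply List.map_congr_left
  intro k _
  simp

lemma diag_second (rows cols k : Nat) (hc : 1 ≤ cols) :
    pvDiag rows cols (cols + k) = pvWhileA rows (1 + k) ((cols : Int) - 1) := by
  rw [pvWhileA_eq rows rows (1 + k) ((cols : Int) - 1) (by omega)]
  unfold pvDiag
  have h2 : min rows (cols + k + 1) - (cols + k + 1 - cols)
      = min (rows - (1 + k)) (((cols : Int) - 1) + 1).toNat := by omega
  have h1 : cols + k + 1 - cols = 1 + k := by omega
  rw [h2, h1]
  apply List.map_congr_left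
  intro j _
  have : ((cols : Int)) + (k : Int) - (j : Int) = (cols : Int) - 1 + ((1 : Nat) + k : Nat) - j := by
    push_cast; ring
  push_cast
  push_cast at this
  simp [this]

lemma main_eq (rows cols : Nat) (hr : 1 ≤ rows) :
    (List.range' 1 (rows - 1)).foldl
      (fun res (r : Nat) => res ++ pvWhileA rows r ((cols : Int) - 1))
      ((List.range cols).foldl (fun res (c : Nat) => res ++ pvWhileA rows 0 (c : Int)) [])
    = (List.range (rows + cols - 1)).foldl (fun res (s : Nat) =>
        (List.range' (s + 1 - cols) (min rows (s + 1) - (s + 1 - cols))).foldl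
          (fun res2 (r : Nat) => res2 ++ [((r : Int), (s : Int) - (r : Int))]) res) [] := by
  have hinner : ∀ (res : List (Int × Int)) (s : Nat),
      (List.range' (s + 1 - cols) (min rows (s + 1) - (s + 1 - cols))).foldl
        (fun res2 (r : Nat) => res2 ++ [((r : Int), (s : Int) - (r : Int))]) res
        = res ++ pvDiag rows cols s := by
    intro res s
    rw [PySem.List.foldl_append_singleton_eq_map]
    rfl
  simp only [hinner]
  rw [PySem.List.foldl_append_eq_flatMap, PySem.List.foldl_append_eq_flatMap,
      PySem.List.foldl_append_eq_flatMap]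
  simp only [List.nil_append]
  rcases Nat.eq_zero_or_pos cols with hc0 | hc1
  · -- cols = 0 : both sides are empty
    subst hc0
    have hA2 : ∀ r ∈ List.range' 1 (rows - 1),
        pvWhileA rows r (((0 : Nat) : Int) - 1) = ([] : List (Int × Int)) := by
      intro r _
      rw [pvWhileA, dif_neg (by omega)]
    have hB : ∀ s ∈ List.range (rows + 0 - 1), pvDiag rows 0 s = ([] : List (Int × Int)) := by
      intro s _
      unfold pvDiag
      have : min rows (s + 1) - (s + 1 - 0) = 0 := by omega
      rw [this]; rfl
    rw [flatMap_congr' _ _ _ hB, flatMap_congr' _ _ _ hA2]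
    have hnil : ∀ (l : List Nat), l.flatMap (fun _ => ([] : List (Int × Int))) = [] := by
      intro l; induction l with
      | nil => rfl
      | cons a l ih => simp [ih]
    simp [hnil]
  · -- cols ≥ 1 : split B's range at cols
    have hsplit : rows + cols - 1 = cols + (rows - 1) := by omega
    rw [hsplit, List.range_add, List.flatMap_append, List.flatMap_map]
    congr 1
    · exact (flatMap_congr' _ _ _ (fun s hs =>
        diag_first rows cols s (List.mem_range.mp hs))).symm
    · have hr' : List.range' 1 (rows - 1) = (List.range (rows - 1)).map (1 + ·) := by
        rw [List.range'_eq_map_range]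
      rw [hr', List.flatMap_map]
      apply flatMap_congr'
      intro k _
      exact (diag_second rows cols k hc1).symm

-- ===== VERDICT (by name: the statement is the Claim_ definition above) =====
theorem secondary_diagonal_traversal_spec : Claim_equal_secondary_diagonal_traversal := by
  intro grid _ hpre
  unfold Spec_secondary_diagonal_traversal
  obtain ⟨g0, gs, rfl⟩ := List.exists_cons_of_ne_nil hpre
  unfold secondary_diagonal_traversal secondary_diagonal_traversal_alt
  simp only [List.headD_cons, List.length_cons]
  exact main_eq (gs.length + 1) g0.length (by omega)
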